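-- pv_equiv track=rewrite | github.com/WithSecureLabs/FixerUpper | misc/QuickFIX.py | update_field
-- ===== SOURCE A (Python) =====
-- def update_field(raw_message, flag, new_value, SOH="\x01"):
--     msg_fields = raw_message.split(SOH)
--     for i, field in enumerate(msg_fields):
--         if field.startswith(flag + "="):
--             msg_fields[i] = flag + "=" + str(new_value)
--             break
--
--     new_message = SOH.join(msg_fields)
--
--     return new_message
-- ===== SOURCE B (Python) =====
-- def update_field(raw_message, flag, new_value, SOH="\x01"):
--     # Single in-place scan over the raw string: walk field boundaries with
--     # str.find and splice the replacement directly -- no split list, no join.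
--     target = flag + "="
--     n = len(raw_message)
--     pos = 0
--     while True:
--         end = raw_message.find(SOH, pos)
--         field_end = n if end == -1 else end
--         if raw_message.startswith(target, pos, field_end):
--             return raw_message[:pos] + target + str(new_value) + raw_message[field_end:]
--         if end == -1:
--             return raw_message
--         pos = end + len(SOH)
-- ===== Notes on version B (the rewrite author's own statement) =====
-- stated objective: alternative
-- what changed: A splits the message into a list of fields, mutates the first matching field and joins the list back; B never builds a list: it walks the raw string over separator boundaries with str.find and splices the replacement in place with one slice expression.
-- outside the precondition, e.g. on update_field('8=F|35=D', '35', 'G', ''): A raises ValueError, B does not finish within the time limit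
import Mathlib
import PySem

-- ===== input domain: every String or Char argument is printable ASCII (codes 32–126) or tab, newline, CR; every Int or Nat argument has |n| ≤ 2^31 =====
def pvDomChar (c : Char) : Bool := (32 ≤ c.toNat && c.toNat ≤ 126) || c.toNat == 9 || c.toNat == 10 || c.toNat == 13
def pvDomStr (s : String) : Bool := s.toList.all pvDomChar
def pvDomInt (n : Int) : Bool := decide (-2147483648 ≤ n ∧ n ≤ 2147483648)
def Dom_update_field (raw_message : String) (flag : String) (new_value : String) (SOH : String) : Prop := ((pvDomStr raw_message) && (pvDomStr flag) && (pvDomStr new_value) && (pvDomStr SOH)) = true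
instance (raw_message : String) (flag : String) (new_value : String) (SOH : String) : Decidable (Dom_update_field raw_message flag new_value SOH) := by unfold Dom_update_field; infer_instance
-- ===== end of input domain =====

-- B replaces A's split-list / mutate / join round trip by a single in-place scan of the raw
-- string over field boundaries (alternative decomposition; equal return value on Pre_).

-- ===== PORT A =====
-- the for/enumerate/mutate/break loop of A: replace the first field starting with pref
def pvUpdLoop (pref newf : String) : List String → List String
  | [] => []
  | f :: rest =>
    if PySem.Str.startswith f pref then newf :: rest
    else f :: pvUpdLoop pref newf rest

def update_field (raw_message : String) (flag : String) (new_value : String) (SOH : String) : String :=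
  match PySem.Str.split? raw_message SOH with
  | none => raw_message  -- Python raises ValueError here (SOH = ""); excluded by Pre_update_field
  | some msg_fields => PySem.Str.join SOH (pvUpdLoop (flag ++ "=") (flag ++ "=" ++ new_value) msg_fields)

-- ===== PORT B =====
-- B's while-loop; fuel (= len+1) only makes the recursion total: the Python loop terminates
-- whenever SOH ≠ "" because pos strictly increases, and SOH = "" is excluded by Pre_update_field.
-- `raw.startswith(target, pos, field_end)` is ported as tgt prefix-of (s[pos:field_end]),
-- exact because the loop keeps 0 ≤ pos ≤ field_end ≤ len(raw).
def pvScan (s sep tgt nv : List Char) : Nat → Nat → List Char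
  | 0, _ => s
  | fuel+1, pos =>
    let e := PySem.Chars.findFrom s sep (pos : Int)
    let fieldEnd := if e = -1 then s.length else e.toNat
    if PySem.Chars.startswith (List.take (fieldEnd - pos) (List.drop pos s)) tgt then
      List.take pos s ++ tgt ++ nv ++ List.drop fieldEnd s
    else if e = -1 then s
    else pvScan s sep tgt nv fuel (e.toNat + sep.length)

def update_field_alt (raw_message : String) (flag : String) (new_value : String) (SOH : String) : String :=
  String.ofList (pvScan raw_message.toList SOH.toList (flag ++ "=").toList new_value.toList
    (raw_message.toList.length + 1) 0)

-- ===== PRECONDITION & SPEC =====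
-- Pre_ excludes only SOH = "", on which Python A raises ValueError('empty separator').
def Pre_update_field (raw_message : String) (flag : String) (new_value : String) (SOH : String) : Prop := SOH ≠ ""
instance (raw_message : String) (flag : String) (new_value : String) (SOH : String) : Decidable (Pre_update_field raw_message flag new_value SOH) := by unfold Pre_update_field; infer_instance

def pvWitness_update_field : String × String × String × String := ("8=FIX.4.2|35=D|49=X", "35", "8", "|")

def Spec_update_field (raw_message : String) (flag : String) (new_value : String) (SOH : String) (out : String) : Prop := out = update_field_alt raw_message flag new_value SOH
instance (raw_message : String) (flag : String) (new_value : String) (SOH : String) (out : String) : Decidable (Spec_update_field raw_message flag new_value SOH out) := by unfold Spec_update_field; infer_instance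

-- ===== CLAIM (what is proved, stated in full; the proofs are below) =====
def Claim_equal_update_field : Prop := ∀ (raw_message : String) (flag : String) (new_value : String) (SOH : String), Dom_update_field raw_message flag new_value SOH → Pre_update_field raw_message flag new_value SOH → Spec_update_field raw_message flag new_value SOH (update_field raw_message flag new_value SOH)

-- ===== LEMMAS AND PROOFS =====

-- common reference shape: one step per field, on List Char
def pvCore (sep tgt nv : List Char) : Nat → List Char → List Char
  | 0, s => s
  | fuel+1, s =>
    let e := PySem.Chars.find s sep
    let fe := if e = -1 then s.length else e.toNat
    if PySem.Chars.startswith (s.take fe) tgt then tgt ++ nv ++ s.drop fe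
    else if e = -1 then s
    else s.take fe ++ sep ++ pvCore sep tgt nv fuel (s.drop (fe + sep.length))

-- clean recursion computing str.split(sep) one separator at a time
def pvSplit (sep : List Char) : Nat → List Char → List (List Char)
  | 0, l => [l]
  | fuel+1, l =>
    let e := PySem.Chars.find l sep
    if e = -1 then [l]
    else l.take e.toNat :: pvSplit sep fuel (l.drop (e.toNat + sep.length))

-- chars view of pvUpdLoop
def pvRepl (pref newf : List Char) : List (List Char) → List (List Char)
  | [] => []
  | f :: rest =>
    if PySem.Chars.startswith f pref then newf :: rest
    else f :: pvRepl pref newf rest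

lemma pvOcc (sep l : List Char) (hsep : sep ≠ []) (h : PySem.Chars.find l sep ≠ -1) :
    sep <+: l.drop (PySem.Chars.find l sep).toNat ∧
    (PySem.Chars.find l sep).toNat + sep.length ≤ l.length ∧
    l.drop (PySem.Chars.find l sep).toNat = sep ++ l.drop ((PySem.Chars.find l sep).toNat + sep.length) := by
  have h1 := PySem.Chars.neg_one_le_find l sep
  have h0 : 0 ≤ PySem.Chars.find l sep := by omega
  obtain ⟨hp, -⟩ := PySem.Chars.find_spec h0
  refine ⟨hp, ?_, ?_⟩
  · obtain ⟨t, ht⟩ := hp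
    have hl : sep.length + t.length = l.length - (PySem.Chars.find l sep).toNat := by
      have := congrArg List.length ht
      simpa using this
    have hs : 1 ≤ sep.length := by
      cases sep with
      | nil => exact absurd rfl hsep
      | cons a b => simp
    have h2 := PySem.Chars.find_le_length l sep
    omega
  · obtain ⟨t, ht⟩ := hp
    have : t = l.drop ((PySem.Chars.find l sep).toNat + sep.length) := by
      have h3 := congrArg (List.drop sep.length) ht
      simpa [List.drop_drop, Nat.add_comm] using h3
    rw [← ht, this]

lemma pvFindEq (l sep : List Char) (k : Nat) (hk : sep <+: l.drop k)
    (hmin : ∀ i < k, ¬ sep <+: l.drop i) : PySem.Chars.find l sep = k := by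
  have hin : PySem.Chars.isIn sep l = true :=
    (PySem.Chars.exists_prefix_drop_iff_isIn sep l).1 ⟨k, hk⟩
  have h0 : 0 ≤ PySem.Chars.find l sep :=
    (PySem.Chars.find_nonneg_iff l sep).2 ((PySem.Chars.isIn_iff_infix sep l).1 hin)
  obtain ⟨hp, hm⟩ := PySem.Chars.find_spec h0
  rcases Nat.lt_trichotomy (PySem.Chars.find l sep).toNat k with hlt | heq | hgt
  · exact absurd hp (hmin _ hlt)
  · omega
  · exact absurd hk (hm k hgt)

lemma pvFindCons (c : Char) (rest sep : List Char) (h : ¬ sep <+: (c :: rest)) :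
    PySem.Chars.find (c :: rest) sep =
      if PySem.Chars.find rest sep = -1 then -1 else PySem.Chars.find rest sep + 1 := by
  by_cases hr : PySem.Chars.find rest sep = -1
  · rw [if_pos hr]
    rw [PySem.Chars.find_eq_neg_one_iff]
    intro hinf
    obtain ⟨j, hj⟩ := (PySem.Chars.exists_prefix_drop_iff_isIn sep (c :: rest)).2
      ((PySem.Chars.isIn_iff_infix sep (c :: rest)).2 hinf)
    cases j with
    | zero => exact h (by simpa using hj)
    | succ j =>
      have : sep <+: rest.drop j := by simpa using hj
      have : PySem.Chars.isIn sep rest = true :=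
        (PySem.Chars.exists_prefix_drop_iff_isIn sep rest).1 ⟨j, this⟩
      rw [PySem.Chars.find_eq_neg_one_iff] at hr
      exact hr ((PySem.Chars.isIn_iff_infix sep rest).1 this)
  · have h1 := PySem.Chars.neg_one_le_find rest sep
    have h0 : 0 ≤ PySem.Chars.find rest sep := by omega
    obtain ⟨hp, hm⟩ := PySem.Chars.find_spec h0
    have hres : PySem.Chars.find (c :: rest) sep = ((PySem.Chars.find rest sep).toNat + 1 : Nat) := by
      apply pvFindEq
      · simpa using hp
      · intro i hi
        cases i with
        | zero => simpa using h
        | succ i =>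
          have hi' : i < (PySem.Chars.find rest sep).toNat := by omega
          simpa using hm i hi'
    rw [hres]
    simp only [hr, if_neg hr]
    push_cast
    omega

lemma pvSplit_cons (sep : List Char) (fuel : Nat) (l : List Char) :
    pvSplit sep fuel l = (pvSplit sep fuel l).headI :: (pvSplit sep fuel l).tail := by
  cases fuel with
  | zero => simp [pvSplit]
  | succ fuel =>
    simp only [pvSplit]
    split <;> simp

lemma pvSplitCongr (sep : List Char) (hsep : sep ≠ []) :
    ∀ fuel fuel' l, l.length < fuel → l.length < fuel' →
      pvSplit sep fuel l = pvSplit sep fuel' l := by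
  intro fuel
  induction fuel with
  | zero => intro fuel' l h _; omega
  | succ fuel ih =>
    intro fuel' l h h'
    obtain ⟨g, rfl⟩ : ∃ g, fuel' = g + 1 := ⟨fuel' - 1, by omega⟩
    simp only [pvSplit]
    split
    · rfl
    · rename_i he
      obtain ⟨-, hle, -⟩ := pvOcc sep l hsep he
      have hs : 1 ≤ sep.length := by cases sep with | nil => exact absurd rfl hsep | cons a b => simp
      have hlen : (l.drop ((PySem.Chars.find l sep).toNat + sep.length)).length < fuel := by
        simp only [List.length_drop]; omega
      have hlen' : (l.drop ((PySem.Chars.find l sep).toNat + sep.length)).length < g := by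
        simp only [List.length_drop]; omega
      rw [ih _ _ hlen hlen']

lemma pvGo (sep : List Char) (hsep : sep ≠ []) :
    ∀ fuel l cur acc, l.length < fuel →
      PySem.Chars.splitOn.go sep fuel l cur acc =
        acc.reverse ++ ((cur.reverse ++ (pvSplit sep fuel l).headI) :: (pvSplit sep fuel l).tail) := by
  intro fuel
  induction fuel with
  | zero => intro l cur acc h; omega
  | succ fuel ih =>
    intro l cur acc h
    cases l with
    | nil =>
      have hf : PySem.Chars.find ([] : List Char) sep = -1 := by
        rw [PySem.Chars.find_eq_neg_one_iff]
        intro hinf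
        have := List.eq_nil_of_infix_nil hinf
        exact hsep this
      simp [PySem.Chars.splitOn.go, pvSplit, hf]
    | cons c rest =>
      by_cases hpre : sep.isPrefixOf (c :: rest)
      · have hpre' : sep <+: (c :: rest) := by simpa [List.isPrefixOf_iff_prefix] using hpre
        have hf : PySem.Chars.find (c :: rest) sep = ((0 : Nat) : Int) := by
          apply pvFindEq
          · simpa using hpre'
          · intro i hi; omega
        have hs : 1 ≤ sep.length := by cases sep with | nil => exact absurd rfl hsep | cons a b => simp
        have hlen : ((c :: rest).drop sep.length).length < fuel := by
          have e1 : ((c :: rest).drop sep.length).length = rest.length + 1 - sep.length := by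
            simp
          have e2 : rest.length + 1 < fuel + 1 := by simpa using h
          omega
        rw [show PySem.Chars.splitOn.go sep (fuel+1) (c::rest) cur acc
              = PySem.Chars.splitOn.go sep fuel (List.drop sep.length (c::rest)) [] (cur.reverse :: acc) by
            simp [PySem.Chars.splitOn.go, hpre]]
        rw [ih _ _ _ hlen]
        have hsplit : pvSplit sep (fuel+1) (c::rest)
            = [] :: pvSplit sep fuel ((c::rest).drop sep.length) := by
          simp [pvSplit, hf]
        rw [hsplit]
        rw [pvSplit_cons sep fuel ((c::rest).drop sep.length)]
        simp
      · have hpre' : ¬ sep <+: (c :: rest) := by simpa [List.isPrefixOf_iff_prefix] using hpre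
        have hstep : PySem.Chars.splitOn.go sep (fuel+1) (c::rest) cur acc
            = PySem.Chars.splitOn.go sep fuel rest (c :: cur) acc := by
          simp [PySem.Chars.splitOn.go, hpre]
        have hlen : rest.length < fuel := by simp only [List.length_cons] at h; omega
        rw [hstep, ih _ _ _ hlen]
        have hfc := pvFindCons c rest sep hpre'
        by_cases hr : PySem.Chars.find rest sep = -1
        · have hrest : pvSplit sep fuel rest = [rest] := by
            obtain ⟨g, rfl⟩ : ∃ g, fuel = g + 1 := ⟨fuel - 1, by omega⟩
            simp [pvSplit, hr]
          have hl : pvSplit sep (fuel+1) (c::rest) = [c :: rest] := by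
            simp [pvSplit, hfc, hr]
          simp [hrest, hl]
        · have h1 := PySem.Chars.neg_one_le_find rest sep
          have h0 : 0 ≤ PySem.Chars.find rest sep := by omega
          obtain ⟨-, hle, -⟩ := pvOcc sep rest hsep hr
          have hs : 1 ≤ sep.length := by cases sep with | nil => exact absurd rfl hsep | cons a b => simp
          obtain ⟨g, rfl⟩ : ∃ g, fuel = g + 1 := ⟨fuel - 1, by omega⟩
          have hne : PySem.Chars.find (c :: rest) sep ≠ -1 := by rw [hfc]; simp [hr]; omega
          have htn : (PySem.Chars.find (c :: rest) sep).toNat = (PySem.Chars.find rest sep).toNat + 1 := by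
            rw [hfc]; simp [hr]; omega
          have hdrop : (c :: rest).drop ((PySem.Chars.find (c :: rest) sep).toNat + sep.length)
              = rest.drop ((PySem.Chars.find rest sep).toNat + sep.length) := by
            rw [htn, show (PySem.Chars.find rest sep).toNat + 1 + sep.length
                  = ((PySem.Chars.find rest sep).toNat + sep.length) + 1 from by omega,
               List.drop_succ_cons]
          have htake : (c :: rest).take ((PySem.Chars.find (c :: rest) sep).toNat)
              = c :: rest.take (PySem.Chars.find rest sep).toNat := by
            rw [htn]; simp
          have hcl : (c :: rest).length = rest.length + 1 := by simp
          have e1 : (rest.drop ((PySem.Chars.find rest sep).toNat + sep.length)).length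
              = rest.length - ((PySem.Chars.find rest sep).toNat + sep.length) := by simp
          have hlen1 : (rest.drop ((PySem.Chars.find rest sep).toNat + sep.length)).length < g + 1 := by
            omega
          have hlen2 : (rest.drop ((PySem.Chars.find rest sep).toNat + sep.length)).length < g := by
            omega
          have hl : pvSplit sep (g+1+1) (c::rest)
              = (c :: rest.take (PySem.Chars.find rest sep).toNat)
                :: pvSplit sep (g+1) (rest.drop ((PySem.Chars.find rest sep).toNat + sep.length)) := by
            simp only [pvSplit, if_neg hne]
            rw [htake, hdrop]
          have hrest : pvSplit sep (g+1) rest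
              = rest.take (PySem.Chars.find rest sep).toNat
                :: pvSplit sep (g+1) (rest.drop ((PySem.Chars.find rest sep).toNat + sep.length)) := by
            simp only [pvSplit, if_neg hr]
            congr 1
            exact pvSplitCongr sep hsep _ _ _ hlen2 hlen1
          rw [hl, hrest]
          simp

lemma pvSplitOn (l sep : List Char) (hsep : sep ≠ []) :
    PySem.Chars.splitOn l sep = pvSplit sep (l.length + 1) l := by
  have := pvGo sep hsep (l.length + 1) l [] [] (by omega)
  rw [PySem.Chars.splitOn, this]
  simp
  exact (pvSplit_cons sep (l.length + 1) l).symm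

lemma pvJoinSplit (sep : List Char) (hsep : sep ≠ []) :
    ∀ fuel l, l.length < fuel → PySem.Chars.join sep (pvSplit sep fuel l) = l := by
  intro fuel
  induction fuel with
  | zero => intro l h; omega
  | succ fuel ih =>
    intro l h
    simp only [pvSplit]
    split
    · exact PySem.Chars.join_singleton sep l
    · rename_i he
      obtain ⟨-, hle, hdec⟩ := pvOcc sep l hsep he
      have hs : 1 ≤ sep.length := by cases sep with | nil => exact absurd rfl hsep | cons a b => simp
      have hlen : (l.drop ((PySem.Chars.find l sep).toNat + sep.length)).length < fuel := by
        simp only [List.length_drop]; omega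
      rw [pvSplit_cons sep fuel, PySem.Chars.join_cons_cons,
          ← pvSplit_cons sep fuel, ih _ hlen]
      rw [List.append_assoc, ← hdec]
      exact List.take_append_drop _ l

lemma pvJoinReplCons (sep tgt newf a : List Char) (L : List (List Char))
    (hL : L = L.headI :: L.tail) :
    PySem.Chars.join sep (a :: pvRepl tgt newf L) = a ++ sep ++ PySem.Chars.join sep (pvRepl tgt newf L) := by
  rw [hL]
  simp only [pvRepl]
  split <;> rw [PySem.Chars.join_cons_cons]

lemma pvCoreA (sep tgt nv : List Char) (hsep : sep ≠ []) :
    ∀ fuel l, l.length < fuel →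
      PySem.Chars.join sep (pvRepl tgt (tgt ++ nv) (pvSplit sep fuel l)) = pvCore sep tgt nv fuel l := by
  intro fuel
  induction fuel with
  | zero => intro l h; omega
  | succ fuel ih =>
    intro l h
    by_cases he : PySem.Chars.find l sep = -1
    · have hsplit : pvSplit sep (fuel+1) l = [l] := by simp [pvSplit, he]
      have hcore : pvCore sep tgt nv (fuel+1) l =
          (if PySem.Chars.startswith l tgt then tgt ++ nv ++ List.drop l.length l else l) := by
        simp [pvCore, he, List.take_length]
      rw [hsplit, hcore]
      by_cases hsw : PySem.Chars.startswith l tgt = true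
      · simp [pvRepl, hsw, PySem.Chars.join_singleton, List.drop_length]
      · simp [pvRepl, hsw, PySem.Chars.join_singleton]
    · obtain ⟨-, hle, hdec⟩ := pvOcc sep l hsep he
      have hs : 1 ≤ sep.length := by cases sep with | nil => exact absurd rfl hsep | cons a b => simp
      have hlen : (l.drop ((PySem.Chars.find l sep).toNat + sep.length)).length < fuel := by
        have e1 : (l.drop ((PySem.Chars.find l sep).toNat + sep.length)).length
            = l.length - ((PySem.Chars.find l sep).toNat + sep.length) := by simp
        omega
      have hsplit : pvSplit sep (fuel+1) l
          = l.take (PySem.Chars.find l sep).toNat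
            :: pvSplit sep fuel (l.drop ((PySem.Chars.find l sep).toNat + sep.length)) := by
        simp [pvSplit, he]
      have hcore : pvCore sep tgt nv (fuel+1) l =
          (if PySem.Chars.startswith (l.take (PySem.Chars.find l sep).toNat) tgt
            then tgt ++ nv ++ l.drop (PySem.Chars.find l sep).toNat
            else l.take (PySem.Chars.find l sep).toNat ++ sep
              ++ pvCore sep tgt nv fuel (l.drop ((PySem.Chars.find l sep).toNat + sep.length))) := by
        simp [pvCore, he]
      rw [hsplit, hcore]
      by_cases hsw : PySem.Chars.startswith (l.take (PySem.Chars.find l sep).toNat) tgt = true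
      · simp only [pvRepl, hsw, if_pos rfl, if_true]
        rw [pvSplit_cons sep fuel, PySem.Chars.join_cons_cons, ← pvSplit_cons sep fuel,
            pvJoinSplit sep hsep _ _ hlen]
        rw [hdec]
        simp [List.append_assoc]
      · simp only [pvRepl, if_neg hsw]
        rw [pvJoinReplCons sep tgt (tgt ++ nv) _ _ (pvSplit_cons sep fuel _), ih _ hlen]

lemma pvCoreB (s sep tgt nv : List Char) (hsep : sep ≠ []) :
    ∀ fuel pos, pos ≤ s.length → s.length - pos < fuel →
      pvScan s sep tgt nv fuel pos = s.take pos ++ pvCore sep tgt nv fuel (s.drop pos) := by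
  intro fuel
  induction fuel with
  | zero => intro pos h1 h2; omega
  | succ fuel ih =>
    intro pos hpos h
    have hff := PySem.Chars.findFrom_natCast s sep pos hpos
    set t := s.drop pos with ht
    have htl : t.length = s.length - pos := by simp [ht]
    by_cases he : PySem.Chars.find t sep = -1
    · have hscan : pvScan s sep tgt nv (fuel+1) pos =
          (if PySem.Chars.startswith (List.take (s.length - pos) t) tgt
            then List.take pos s ++ tgt ++ nv ++ List.drop s.length s else s) := by
        simp only [pvScan]
        rw [hff]
        simp [he, ← ht]
      have hcore : pvCore sep tgt nv (fuel+1) t =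
          (if PySem.Chars.startswith (List.take t.length t) tgt
            then tgt ++ nv ++ List.drop t.length t else t) := by
        simp [pvCore, he]
      have htake : List.take (s.length - pos) t = t := by rw [← htl]; exact List.take_length
      have hdrop0 : List.drop (s.length - pos) t = [] := by rw [← htl]; exact List.drop_length
      rw [hscan, hcore, htl, htake]
      by_cases hsw : PySem.Chars.startswith t tgt = true
      · rw [if_pos hsw, if_pos hsw, hdrop0, List.drop_length]
        simp
      · rw [if_neg hsw, if_neg hsw, ht]
        exact (List.take_append_drop pos s).symm
    · have h1 := PySem.Chars.neg_one_le_find t sep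
      have h0 : 0 ≤ PySem.Chars.find t sep := by omega
      have hne : ¬ ((pos : Int) + PySem.Chars.find t sep = -1) := by omega
      obtain ⟨-, hle, hdec⟩ := pvOcc sep t hsep he
      have hs : 1 ≤ sep.length := by cases sep with | nil => exact absurd rfl hsep | cons a b => simp
      have htn : ((pos : Int) + PySem.Chars.find t sep).toNat = pos + (PySem.Chars.find t sep).toNat := by
        omega
      have hsub : pos + (PySem.Chars.find t sep).toNat - pos = (PySem.Chars.find t sep).toNat := by omega
      have hdd : s.drop (pos + (PySem.Chars.find t sep).toNat) = t.drop (PySem.Chars.find t sep).toNat := by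
        rw [ht, List.drop_drop]
      have hscan : pvScan s sep tgt nv (fuel+1) pos =
          (if PySem.Chars.startswith (List.take (PySem.Chars.find t sep).toNat t) tgt
            then List.take pos s ++ tgt ++ nv ++ List.drop (pos + (PySem.Chars.find t sep).toNat) s
            else pvScan s sep tgt nv fuel (pos + (PySem.Chars.find t sep).toNat + sep.length)) := by
        simp only [pvScan]
        rw [hff]
        rw [if_neg he, if_neg hne, if_neg hne, htn, hsub, ← ht]
      have hcore : pvCore sep tgt nv (fuel+1) t =
          (if PySem.Chars.startswith (List.take (PySem.Chars.find t sep).toNat t) tgt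
            then tgt ++ nv ++ t.drop (PySem.Chars.find t sep).toNat
            else t.take (PySem.Chars.find t sep).toNat ++ sep
              ++ pvCore sep tgt nv fuel (t.drop ((PySem.Chars.find t sep).toNat + sep.length))) := by
        simp [pvCore, he]
      rw [hscan, hcore]
      by_cases hsw : PySem.Chars.startswith (List.take (PySem.Chars.find t sep).toNat t) tgt = true
      · rw [if_pos hsw, if_pos hsw, hdd]
        simp [List.append_assoc]
      · rw [if_neg hsw, if_neg hsw]
        have hpos' : pos + (PySem.Chars.find t sep).toNat + sep.length ≤ s.length := by omega
        have hfuel' : s.length - (pos + (PySem.Chars.find t sep).toNat + sep.length) < fuel := by omega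
        rw [ih _ hpos' hfuel']
        have hdrop2 : s.drop (pos + (PySem.Chars.find t sep).toNat + sep.length)
            = t.drop ((PySem.Chars.find t sep).toNat + sep.length) := by
          rw [ht, List.drop_drop, Nat.add_assoc]
        have htk : List.take (pos + ((PySem.Chars.find t sep).toNat + sep.length)) s
            = List.take pos s ++ (List.take (PySem.Chars.find t sep).toNat t ++ sep) := by
          rw [List.take_add, ← ht]
          congr 1
          rw [List.take_add]
          congr 1
          rw [hdec]
          exact List.take_left' rfl
        rw [show pos + (PySem.Chars.find t sep).toNat + sep.length
              = pos + ((PySem.Chars.find t sep).toNat + sep.length) from by omega] at hdrop2 ⊢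
        rw [htk, hdrop2]
        simp [List.append_assoc]

lemma pvUpdLoopMap (pref newf : String) :
    ∀ fs : List String,
      (pvUpdLoop pref newf fs).map String.toList
        = pvRepl pref.toList newf.toList (fs.map String.toList) := by
  intro fs
  induction fs with
  | nil => simp [pvUpdLoop, pvRepl]
  | cons f rest ih =>
    simp only [pvUpdLoop, pvRepl, List.map_cons]
    rw [show PySem.Str.startswith f pref = PySem.Chars.startswith f.toList pref.toList from
      PySem.Str.startswith_eq f pref]
    split <;> simp [ih]

-- ===== VERDICT (by name: the statement is the Claim_ definition above) =====
theorem update_field_spec : Claim_equal_update_field := by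
  intro raw flag nv SOH hdom hpre
  unfold Spec_update_field
  have hsep : SOH.toList ≠ [] := by
    intro hn
    exact hpre (String.ext (by simp [hn]))
  have hsplit : PySem.Chars.split? raw.toList SOH.toList = some (PySem.Chars.splitOn raw.toList SOH.toList) := by
    simp [PySem.Chars.split?, List.isEmpty_iff, hsep]
  have hmap := PySem.Str.split?_map raw SOH
  rw [hsplit] at hmap
  obtain ⟨fs, hfs, hfsmap⟩ : ∃ fs, PySem.Str.split? raw SOH = some fs ∧
      fs.map String.toList = PySem.Chars.splitOn raw.toList SOH.toList := by
    cases hq : PySem.Str.split? raw SOH with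
    | none => rw [hq] at hmap; simp at hmap
    | some fs => rw [hq] at hmap; simp at hmap; exact ⟨fs, rfl, hmap⟩
  apply String.ext
  rw [update_field, hfs]
  rw [PySem.Str.toList_join, pvUpdLoopMap]
  have htgt : (flag ++ "=").toList = flag.toList ++ ['='] := by simp
  have hnew : (flag ++ "=" ++ nv).toList = (flag.toList ++ ['=']) ++ nv.toList := by simp
  rw [hfsmap, pvSplitOn raw.toList SOH.toList hsep, htgt, hnew]
  rw [pvCoreA SOH.toList (flag.toList ++ ['=']) nv.toList hsep (raw.toList.length + 1) raw.toList (by omega)]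
  rw [update_field_alt]
  simp only [String.toList_ofList]
  rw [pvCoreB raw.toList SOH.toList ((flag ++ "=").toList) nv.toList hsep (raw.toList.length + 1) 0
      (by omega) (by omega)]
  simp [htgt]
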